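-- pv_equiv track=rewrite | github.com/satyaprakashdhfm/news_categorize | browser_replica_app/backend/app/api/browser_scrape.py | _section_matches_domain
-- ===== SOURCE A (Python) =====
-- def _section_matches_domain(section: str, domain_slug: str, ai_query: bool) -> bool:
--     s = str(section or "").lower()
--     if ai_query:
--         return "artificial intelligence" in s or "machine learning" in s
--     if domain_slug == "technology":
--         tech_sections = [
--             "tech news",
--             "programming",
--             "software",
--             "computers",
--             "consumer electronics",
--             "artificial intelligence",
--             "virtual",
--         ]
--         return any(k in s for k in tech_sections)
--     if domain_slug == "news_and_politics":
--         return "news" in s or "politics" in s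
--     if domain_slug == "business_and_finance":
--         return "business" in s or "finance" in s
--     if domain_slug == "science":
--         return "science" in s
--     return True
-- ===== SOURCE B (Python) =====
-- # Flat (keyword, slug) table scanned once: collect ALL domains whose keywords occur in s,
-- # then answer by membership; unknown slugs pass because they are not in the known-slug list.
-- PAIRS = [
--     ("tech news", "technology"),
--     ("programming", "technology"),
--     ("software", "technology"),
--     ("computers", "technology"),
--     ("consumer electronics", "technology"),
--     ("artificial intelligence", "technology"),
--     ("virtual", "technology"),
--     ("news", "news_and_politics"),
--     ("politics", "news_and_politics"),
--     ("business", "business_and_finance"),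
--     ("finance", "business_and_finance"),
--     ("science", "science"),
-- ]
--
--
-- def _section_matches_domain(section: str, domain_slug: str, ai_query: bool) -> bool:
--     s = str(section or "").lower()
--     if ai_query:
--         return "artificial intelligence" in s or "machine learning" in s
--     matched = [slug for kw, slug in PAIRS if kw in s]
--     known = [slug for kw, slug in PAIRS]
--     return domain_slug in matched or domain_slug not in known
-- ===== Notes on version B (the rewrite author's own statement) =====
-- stated objective: alternative
-- what changed: Replaces the per-slug branch dispatch by one flat (keyword, slug) table scanned uniformly: B computes the list of all domains whose keywords occur in the section and answers by membership, with unknown slugs passing because they are absent from the known-slug list.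
import Mathlib
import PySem

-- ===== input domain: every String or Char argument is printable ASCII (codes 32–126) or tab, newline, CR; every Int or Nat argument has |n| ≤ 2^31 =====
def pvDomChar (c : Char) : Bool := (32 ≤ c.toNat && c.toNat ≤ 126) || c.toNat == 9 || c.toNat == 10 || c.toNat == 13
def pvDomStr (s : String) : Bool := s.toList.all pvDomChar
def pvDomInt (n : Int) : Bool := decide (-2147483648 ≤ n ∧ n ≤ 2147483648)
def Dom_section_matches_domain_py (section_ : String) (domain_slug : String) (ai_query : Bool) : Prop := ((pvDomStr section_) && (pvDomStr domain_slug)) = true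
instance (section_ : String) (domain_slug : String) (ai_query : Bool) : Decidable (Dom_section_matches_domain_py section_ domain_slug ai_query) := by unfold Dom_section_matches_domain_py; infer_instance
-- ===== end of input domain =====

-- B replaces A's per-slug branch dispatch by one flat (keyword, slug) table scanned uniformly:
-- it collects all domains whose keywords occur in the section and answers by membership;
-- objective: alternative. Same return value everywhere.

-- ===== PORT A =====
def section_matches_domain_py (section_ : String) (domain_slug : String) (ai_query : Bool) : Bool :=
  let s := PySem.Str.lower section_
  if ai_query then
    PySem.Str.isIn "artificial intelligence" s || PySem.Str.isIn "machine learning" s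
  else if domain_slug == "technology" then
    let tech_sections : List String :=
      ["tech news", "programming", "software", "computers",
       "consumer electronics", "artificial intelligence", "virtual"]
    tech_sections.any (fun k => PySem.Str.isIn k s)
  else if domain_slug == "news_and_politics" then
    PySem.Str.isIn "news" s || PySem.Str.isIn "politics" s
  else if domain_slug == "business_and_finance" then
    PySem.Str.isIn "business" s || PySem.Str.isIn "finance" s
  else if domain_slug == "science" then
    PySem.Str.isIn "science" s
  else
    true

-- ===== PORT B =====
def pvPAIRS : List (String × String) :=
  [("tech news", "technology"),
   ("programming", "technology"),
   ("software", "technology"),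
   ("computers", "technology"),
   ("consumer electronics", "technology"),
   ("artificial intelligence", "technology"),
   ("virtual", "technology"),
   ("news", "news_and_politics"),
   ("politics", "news_and_politics"),
   ("business", "business_and_finance"),
   ("finance", "business_and_finance"),
   ("science", "science")]

def section_matches_domain_py_alt (section_ : String) (domain_slug : String) (ai_query : Bool) : Bool :=
  let s := PySem.Str.lower section_
  if ai_query then
    PySem.Str.isIn "artificial intelligence" s || PySem.Str.isIn "machine learning" s
  else
    let matched := (pvPAIRS.filter (fun p => PySem.Str.isIn p.1 s)).map (fun p => p.2)
    let known := pvPAIRS.map (fun p => p.2)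
    matched.contains domain_slug || !(known.contains domain_slug)

-- ===== PRECONDITION & SPEC =====
def Spec_section_matches_domain_py (section_ : String) (domain_slug : String) (ai_query : Bool) (out : Bool) : Prop := out = section_matches_domain_py_alt section_ domain_slug ai_query
instance (section_ : String) (domain_slug : String) (ai_query : Bool) (out : Bool) : Decidable (Spec_section_matches_domain_py section_ domain_slug ai_query out) := by unfold Spec_section_matches_domain_py; infer_instance

-- ===== CLAIM =====
def Claim_equal_section_matches_domain_py : Prop := ∀ (section_ : String) (domain_slug : String) (ai_query : Bool), Dom_section_matches_domain_py section_ domain_slug ai_query → Spec_section_matches_domain_py section_ domain_slug ai_query (section_matches_domain_py section_ domain_slug ai_query)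

-- ===== LEMMAS AND PROOFS =====

-- contains-of-map-of-filter unrolled to an any over the pair table (specific loop shape of B)
theorem pv_contains_map_filter (l : List (String × String)) (f : String → Bool) (x : String) :
    ((l.filter (fun p => f p.1)).map (fun p => p.2)).contains x
      = l.any (fun p => f p.1 && x == p.2) := by
  induction l with
  | nil => simp
  | cons h t ih =>
    simp only [List.filter_cons, List.any_cons, ← ih]
    by_cases hf : f h.1 <;> simp [hf]

-- ===== VERDICT =====
set_option maxRecDepth 8192 in
theorem section_matches_domain_py_spec : Claim_equal_section_matches_domain_py := by
  intro section_ domain_slug ai_query _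
  unfold Spec_section_matches_domain_py section_matches_domain_py section_matches_domain_py_alt
  cases ai_query with
  | true => simp
  | false =>
    simp only [Bool.false_eq_true, if_false, pv_contains_map_filter]
    have k1 : ((pvPAIRS.map (fun p => p.2)).contains "technology") = true := by decide
    have k2 : ((pvPAIRS.map (fun p => p.2)).contains "news_and_politics") = true := by decide
    have k3 : ((pvPAIRS.map (fun p => p.2)).contains "business_and_finance") = true := by decide
    have k4 : ((pvPAIRS.map (fun p => p.2)).contains "science") = true := by decide
    have q11 : (("technology" : String) == "technology") = true := by decide
    have q12 : (("technology" : String) == "news_and_politics") = false := by decide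
    have q13 : (("technology" : String) == "business_and_finance") = false := by decide
    have q14 : (("technology" : String) == "science") = false := by decide
    have q21 : (("news_and_politics" : String) == "technology") = false := by decide
    have q22 : (("news_and_politics" : String) == "news_and_politics") = true := by decide
    have q23 : (("news_and_politics" : String) == "business_and_finance") = false := by decide
    have q24 : (("news_and_politics" : String) == "science") = false := by decide
    have q31 : (("business_and_finance" : String) == "technology") = false := by decide
    have q32 : (("business_and_finance" : String) == "news_and_politics") = false := by decide
    have q33 : (("business_and_finance" : String) == "business_and_finance") = true := by decide
    have q34 : (("business_and_finance" : String) == "science") = false := by decide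
    have q41 : (("science" : String) == "technology") = false := by decide
    have q42 : (("science" : String) == "news_and_politics") = false := by decide
    have q43 : (("science" : String) == "business_and_finance") = false := by decide
    have q44 : (("science" : String) == "science") = true := by decide
    by_cases h1 : domain_slug = "technology"
    · subst h1
      simp only [beq_self_eq_true, if_pos, if_true, pvPAIRS, List.any_cons, List.any_nil, k1,
        q11, q12, q13, q14, Bool.and_true, Bool.and_false, Bool.false_or, Bool.or_false,
        Bool.not_true]
      simp
    · by_cases h2 : domain_slug = "news_and_politics"
      · subst h2
        have e : (("news_and_politics" : String) == "technology") = false := q21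
        simp only [e, if_false, beq_self_eq_true, if_true, pvPAIRS, List.any_cons, List.any_nil,
          k2, q21, q22, q23, q24, Bool.and_true, Bool.and_false, Bool.false_or, Bool.or_false,
          Bool.not_true]
        simp
      · by_cases h3 : domain_slug = "business_and_finance"
        · subst h3
          simp only [q31, q32, if_false, beq_self_eq_true, if_true, pvPAIRS, List.any_cons,
            List.any_nil, k3, q33, q34, Bool.and_true, Bool.and_false, Bool.false_or,
            Bool.or_false, Bool.not_true]
          simp
        · by_cases h4 : domain_slug = "science"
          · subst h4
            simp only [q41, q42, q43, if_false, beq_self_eq_true, if_true, pvPAIRS,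
              List.any_cons, List.any_nil, k4, q44, Bool.and_true, Bool.and_false,
              Bool.false_or, Bool.or_false, Bool.not_true]
            simp
          · have e1 : (domain_slug == "technology") = false := beq_eq_false_iff_ne.mpr h1
            have e2 : (domain_slug == "news_and_politics") = false := beq_eq_false_iff_ne.mpr h2
            have e3 : (domain_slug == "business_and_finance") = false := beq_eq_false_iff_ne.mpr h3
            have e4 : (domain_slug == "science") = false := beq_eq_false_iff_ne.mpr h4
            simp only [e1, e2, e3, e4, if_false, pvPAIRS, List.map_cons, List.map_nil,
              List.contains_cons, Bool.or_self, Bool.or_false, Bool.not_false, Bool.or_true,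
              List.any_cons, List.any_nil, Bool.and_false]
            simp [e1, e2, e3, e4]
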